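-- pv_equiv track=rewrite | github.com/adityapriyanshu61-alt/AUTO-STRIPE-API- | stripeapi.py | is_session_expired_error
-- ===== SOURCE A (Python) =====
-- def is_session_expired_error(response_text, status_code):
--     """Detect if error indicates expired session/nonce"""
--     error_indicators = [
--         'nonce',
--         'expired',
--         'unauthorized',
--         'not logged in',
--         'authentication',
--         'session',
--         'csrf',
--         'invalid token',
--         'please log in',
--         'login required'
--     ]
--
--     if status_code in [401, 403]:
--         return True
--
--     text_lower = response_text.lower()
--     return any(indicator in text_lower for indicator in error_indicators)
-- ===== SOURCE B (Python) =====
-- _INDICATORS = (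
--     'nonce',
--     'expired',
--     'unauthorized',
--     'not logged in',
--     'authentication',
--     'session',
--     'csrf',
--     'invalid token',
--     'please log in',
--     'login required',
-- )
--
--
-- def is_session_expired_error(response_text, status_code):
--     """Detect if error indicates expired session/nonce"""
--     if status_code in (401, 403):
--         return True
--     text_lower = response_text.lower()
--     # single left-to-right scan: at each position, test whether any
--     # indicator phrase starts there
--     for i in range(len(text_lower) + 1):
--         for indicator in _INDICATORS:
--             if text_lower.startswith(indicator, i):
--                 return True
--     return False
-- ===== Notes on version B (the rewrite author's own statement) =====
-- stated objective: alternative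
-- what changed: Replaces the indicator-major any(ind in text) scan (one full substring search per indicator) with a position-major single left-to-right pass over the lowered text that tests at each position whether any indicator phrase starts there.
import Mathlib
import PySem

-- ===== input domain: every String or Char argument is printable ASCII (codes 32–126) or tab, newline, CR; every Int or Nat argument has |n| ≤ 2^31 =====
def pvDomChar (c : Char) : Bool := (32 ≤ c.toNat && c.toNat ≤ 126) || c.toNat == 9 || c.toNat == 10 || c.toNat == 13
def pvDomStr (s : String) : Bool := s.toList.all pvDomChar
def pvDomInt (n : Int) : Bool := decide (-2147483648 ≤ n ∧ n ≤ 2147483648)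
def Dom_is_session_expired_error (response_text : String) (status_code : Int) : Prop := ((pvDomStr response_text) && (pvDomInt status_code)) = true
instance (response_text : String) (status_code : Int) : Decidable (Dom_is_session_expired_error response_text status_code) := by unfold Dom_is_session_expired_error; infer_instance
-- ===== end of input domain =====

-- B replaces A's indicator-major any(ind in text) substring scans with one
-- position-major left-to-right pass testing each indicator as a prefix (alternative, same cost).

-- ===== PORT A =====
def pvErrorIndicators : List String :=
  ["nonce", "expired", "unauthorized", "not logged in", "authentication",
   "session", "csrf", "invalid token", "please log in", "login required"]

def is_session_expired_error (response_text : String) (status_code : Int) : Bool :=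
  if status_code ∈ [(401 : Int), 403] then true
  else
    let text_lower := PySem.Str.lower response_text
    pvErrorIndicators.any (fun indicator => PySem.Str.isIn indicator text_lower)

-- ===== PORT B =====
-- the same module-level tuple of indicator phrases, as code-point lists
def pvIndicatorsB : List (List Char) := pvErrorIndicators.map String.toList

-- 'for i in range(len(t)+1): if any(t.startswith(ind, i) …): return True' as structural
-- recursion over the suffixes of t (the i = len(t) iteration is the [] case)
def pvScanB : List Char → Bool
  | [] => pvIndicatorsB.any (fun ind => PySem.Chars.startswith [] ind)
  | c :: rest =>
      pvIndicatorsB.any (fun ind => PySem.Chars.startswith (c :: rest) ind) || pvScanB rest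

def is_session_expired_error_alt (response_text : String) (status_code : Int) : Bool :=
  if status_code == 401 || status_code == 403 then true
  else pvScanB (PySem.Chars.lower response_text.toList)

-- ===== PRECONDITION & SPEC =====
def Spec_is_session_expired_error (response_text : String) (status_code : Int) (out : Bool) : Prop := out = is_session_expired_error_alt response_text status_code
instance (response_text : String) (status_code : Int) (out : Bool) : Decidable (Spec_is_session_expired_error response_text status_code out) := by unfold Spec_is_session_expired_error; infer_instance

-- ===== CLAIM (what is proved, stated in full; the proofs are below) =====
def Claim_equal_is_session_expired_error : Prop := ∀ (response_text : String) (status_code : Int), Dom_is_session_expired_error response_text status_code → Spec_is_session_expired_error response_text status_code (is_session_expired_error response_text status_code)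

-- ===== LEMMAS AND PROOFS =====

-- the position-major scan finds exactly the indicators occurring as an infix
theorem pvScanB_iff (cs : List Char) :
    pvScanB cs = true ↔ ∃ ind ∈ pvIndicatorsB, ind <:+: cs := by
  induction cs with
  | nil =>
      simp [pvScanB, List.any_eq_true, PySem.Chars.startswith_iff]
  | cons c rest ih =>
      simp only [pvScanB, Bool.or_eq_true, ih, List.any_eq_true,
        PySem.Chars.startswith_iff, List.infix_cons_iff]
      constructor
      · rintro (⟨i, hm, hp⟩ | ⟨i, hm, hi⟩)
        · exact ⟨i, hm, Or.inl hp⟩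
        · exact ⟨i, hm, Or.inr hi⟩
      · rintro ⟨i, hm, hp | hi⟩
        · exact Or.inl ⟨i, hm, hp⟩
        · exact Or.inr ⟨i, hm, hi⟩

-- ===== VERDICT (by name: the statement is the Claim_ definition above) =====
theorem is_session_expired_error_spec : Claim_equal_is_session_expired_error := by
  intro response_text status_code _
  unfold Spec_is_session_expired_error is_session_expired_error is_session_expired_error_alt
  by_cases h4 : status_code = 401 ∨ status_code = 403
  · rcases h4 with h | h <;> subst h <;> simp
  · rcases not_or.mp h4 with ⟨n1, n2⟩
    rw [if_neg (by simpa using h4)]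
    have hb : (status_code == 401 || status_code == 403) = false := by
      simp [n1, n2]
    rw [hb]
    simp only [if_false, Bool.false_eq_true]
    rw [Bool.eq_iff_iff]
    simp only [List.any_eq_true, PySem.Str.isIn_iff_infix, pvScanB_iff,
      pvIndicatorsB, List.mem_map, PySem.Str.toList_lower]
    constructor
    · rintro ⟨s, hm, hi⟩; exact ⟨s.toList, ⟨s, hm, rfl⟩, hi⟩
    · rintro ⟨l, ⟨s, hm, rfl⟩, hi⟩; exact ⟨s, hm, hi⟩
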